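-- pv_equiv track=rewrite | github.com/459359351/aipi | knowledge_service/app/services/recommendation_service.py | _any_fragment_in_content
-- ===== SOURCE A (Python) =====
-- def _any_fragment_in_content(text: str, content: str, min_len: int = 2, max_len: int = 10) -> bool:
--     """若题干中任一片段（长度在 [min_len, max_len]）出现在 content 中则返回 True。"""
--     if not text or not content or len(text) < min_len:
--         return False
--     n = len(text)
--     for length in range(min_len, min(max_len, n) + 1):
--         for i in range(0, n - length + 1):
--             frag = text[i : i + length]
--             if frag in content:
--                 return True
--     return False
-- ===== SOURCE B (Python) =====
-- def _any_fragment_in_content(text: str, content: str, min_len: int = 2, max_len: int = 10) -> bool: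
--     """True iff some fragment of text with length in [min_len, max_len] occurs in content.
--
--     Only min_len-length fragments matter: a longer occurring fragment contains an
--     occurring min_len-prefix.  Index content's positions by a fingerprint (the first
--     min(min_len, 16) characters of the gram) and verify full gram equality on hits.
--     """
--     if not text or not content or len(text) < min_len or min_len > max_len:
--         return False
--     if min_len <= 0:
--         return True  # the empty fragment occurs in any content
--     k = min_len
--     p = min(k, 16)
--     buckets = {}
--     for j in range(len(content) - k + 1):
--         buckets.setdefault(content[j:j + p], []).append(j)
--     for i in range(len(text) - k + 1):
--         for j in buckets.get(text[i:i + p], ()):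
--             if text[i:i + k] == content[j:j + k]:
--                 return True
--     return False
-- ===== Notes on version B (the rewrite author's own statement) =====
-- stated objective: alternative
-- what changed: Instead of scanning every fragment length in [min_len, max_len] and substring-searching content for each fragment, B observes that a longer fragment occurs only if its min_len-prefix occurs, so it indexes content's gram positions by a min(min_len,16)-character fingerprint and makes one verify-on-hit pass over text's min_len-grams.
import Mathlib
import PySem

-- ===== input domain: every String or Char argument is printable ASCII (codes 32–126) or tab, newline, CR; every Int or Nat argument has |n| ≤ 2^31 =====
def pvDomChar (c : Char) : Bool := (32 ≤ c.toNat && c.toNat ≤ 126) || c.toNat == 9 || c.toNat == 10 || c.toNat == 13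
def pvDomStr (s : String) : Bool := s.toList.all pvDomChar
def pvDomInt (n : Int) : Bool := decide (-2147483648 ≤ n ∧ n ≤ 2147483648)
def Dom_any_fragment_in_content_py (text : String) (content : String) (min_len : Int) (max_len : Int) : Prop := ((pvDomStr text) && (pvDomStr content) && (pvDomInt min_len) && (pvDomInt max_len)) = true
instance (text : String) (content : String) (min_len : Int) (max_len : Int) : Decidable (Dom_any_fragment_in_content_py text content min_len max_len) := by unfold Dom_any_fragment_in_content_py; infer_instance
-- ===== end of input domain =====

-- B replaces A's scan over every fragment length in [min_len, max_len] by an index of content's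
-- min_len-gram positions (keyed by a min(min_len,16)-char fingerprint, full gram verified on hit)
-- and one pass over text: a longer fragment occurs only if its min_len-prefix does.

-- ===== PORT A =====
-- Python's lazy 'for v in range(a, b): if f(v): return True' (early exit, range never materialized)
def pvAnyRange (a b : Int) (f : Int → Bool) : Bool :=
  if h : a < b then
    if f a then true else pvAnyRange (a + 1) b f
  else false
termination_by (b - a).toNat
decreasing_by omega

def any_fragment_in_content_py (text : String) (content : String) (min_len : Int) (max_len : Int) : Bool :=
  if PySem.Str.len text = 0 ∨ PySem.Str.len content = 0 ∨ PySem.Str.len text < min_len then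
    false
  else
    let n : Int := PySem.Str.len text
    pvAnyRange min_len (min max_len n + 1) fun length =>
      pvAnyRange 0 (n - length + 1) fun i =>
        PySem.Chars.isIn (PySem.List.slice text.toList (some i) (some (i + length))) content.toList

-- ===== PORT B =====
def any_fragment_in_content_py_alt (text : String) (content : String) (min_len : Int) (max_len : Int) : Bool :=
  if PySem.Str.len text = 0 ∨ PySem.Str.len content = 0 ∨ PySem.Str.len text < min_len ∨ max_len < min_len then
    false
  else if min_len ≤ 0 then
    true
  else
    let k : Int := min_len
    let p : Int := min k 16
    let buckets : PySem.Dict (List Char) (List Int) :=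
      (PySem.List.pyRange 0 (PySem.Str.len content - k + 1)).foldl
        (fun d j => d.insert (PySem.List.slice content.toList (some j) (some (j + p)))
          ((d.getD (PySem.List.slice content.toList (some j) (some (j + p))) []) ++ [j]))
        PySem.Dict.empty
    (PySem.List.pyRange 0 (PySem.Str.len text - k + 1)).any fun i =>
      (buckets.getD (PySem.List.slice text.toList (some i) (some (i + p))) []).any fun j =>
        PySem.List.slice text.toList (some i) (some (i + k))
          == PySem.List.slice content.toList (some j) (some (j + k))

-- ===== PRECONDITION & SPEC =====
def Spec_any_fragment_in_content_py (text : String) (content : String) (min_len : Int) (max_len : Int) (out : Bool) : Prop := out = any_fragment_in_content_py_alt text content min_len max_len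
instance (text : String) (content : String) (min_len : Int) (max_len : Int) (out : Bool) : Decidable (Spec_any_fragment_in_content_py text content min_len max_len out) := by unfold Spec_any_fragment_in_content_py; infer_instance

-- ===== CLAIM (what is proved, stated in full; the proofs are below) =====
def Claim_equal_any_fragment_in_content_py : Prop := ∀ (text : String) (content : String) (min_len : Int) (max_len : Int), Dom_any_fragment_in_content_py text content min_len max_len → Spec_any_fragment_in_content_py text content min_len max_len (any_fragment_in_content_py text content min_len max_len)

-- ===== LEMMAS AND PROOFS =====

-- "some fragment of t of length k occurs in c"
def pvHasFrag (t c : List Char) (k : Nat) : Prop :=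
  ∃ i : Nat, i + k ≤ t.length ∧ (List.take k (List.drop i t)) <:+: c

-- a nonempty list of length k is a prefix of c.drop j iff it is literally the k-gram of c at j
lemma pv_prefix_drop_iff (c frag : List Char) (j k : Nat) (hlen : frag.length = k) (hk : 0 < k) :
    frag <+: List.drop j c ↔ j + k ≤ c.length ∧ frag = List.take k (List.drop j c) := by
  constructor
  · intro h
    have hle : frag.length ≤ (List.drop j c).length := h.length_le
    have heq : frag = List.take frag.length (List.drop j c) := List.prefix_iff_eq_take.mp h
    rw [hlen] at heq
    refine ⟨?_, heq⟩
    simp only [List.length_drop, hlen] at hle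
    omega
  · rintro ⟨hle, rfl⟩
    exact List.take_prefix _ _

-- k-gram infix characterization
lemma pv_infix_iff (c frag : List Char) (k : Nat) (hlen : frag.length = k) (hk : 0 < k) :
    frag <:+: c ↔ ∃ j : Nat, j + k ≤ c.length ∧ frag = List.take k (List.drop j c) := by
  rw [← PySem.Chars.isIn_iff_infix, ← PySem.Chars.exists_prefix_drop_iff_isIn]
  constructor
  · rintro ⟨j, hj⟩
    exact ⟨j, (pv_prefix_drop_iff c frag j k hlen hk).mp hj⟩
  · rintro ⟨j, hj⟩
    exact ⟨j, (pv_prefix_drop_iff c frag j k hlen hk).mpr hj⟩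

lemma pvAnyRange_eq (a b : Int) (f : Int → Bool) :
    pvAnyRange a b f = (PySem.List.pyRange a b).any f := by
  generalize hn : (b - a).toNat = n
  induction n generalizing a with
  | zero =>
    rw [pvAnyRange, dif_neg (by omega)]
    symm
    simp only [List.any_eq_false]
    intro x hx
    rw [PySem.List.mem_pyRange_one] at hx
    omega
  | succ n ih =>
    have h : a < b := by omega
    rw [pvAnyRange, dif_pos h, PySem.List.pyRange_one_cons h, List.any_cons]
    rw [ih (a + 1) (by omega)]
    cases f a <;> simp

lemma pv_A_true_iff (text content : String) (mn mx : Int)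
    (h1 : PySem.Str.len text ≠ 0) (h2 : PySem.Str.len content ≠ 0)
    (h3 : mn ≤ (text.toList.length : Int)) (hmn : 1 ≤ mn) (hmx : mn ≤ mx) :
    any_fragment_in_content_py text content mn mx = true ↔
      pvHasFrag text.toList content.toList mn.toNat := by
  have hnlt : ¬ ((text.toList.length : Int) < mn) := by omega
  simp only [any_fragment_in_content_py, PySem.Str.len_eq] at *
  rw [if_neg (by push Not; exact ⟨by omega, by omega, by omega⟩)]
  simp only [pvAnyRange_eq, List.any_eq_true, PySem.List.mem_pyRange_one]
  set t := text.toList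
  set c := content.toList
  set n := t.length
  constructor
  · rintro ⟨L, ⟨hL1, hL2⟩, i, ⟨hi0, hi1⟩, hfrag⟩
    -- replace Int indices by Nats
    obtain ⟨iN, rfl⟩ : ∃ iN : Nat, (iN : Int) = i := ⟨i.toNat, Int.toNat_of_nonneg hi0⟩
    obtain ⟨LN, rfl⟩ : ∃ LN : Nat, (LN : Int) = L := ⟨L.toNat, Int.toNat_of_nonneg (by omega)⟩
    rw [PySem.List.slice_natCast_add] at hfrag
    have hinf : List.take LN (List.drop iN t) <:+: c := (PySem.Chars.isIn_iff_infix _ _).mp hfrag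
    have hk : mn.toNat ≤ LN := by omega
    refine ⟨iN, by omega, ?_⟩
    have hpre : List.take mn.toNat (List.drop iN t) <+: List.take LN (List.drop iN t) := by
      have htt := List.take_take (i := mn.toNat) (j := LN) (l := List.drop iN t)
      rw [Nat.min_eq_left hk] at htt
      rw [← htt]
      exact List.take_prefix _ _
    exact hpre.isInfix.trans hinf
  · rintro ⟨i, hik, hinf⟩
    refine ⟨mn, ⟨le_refl _, by omega⟩, (i : Int), ⟨by omega, by omega⟩, ?_⟩
    have : mn = ((mn.toNat : Nat) : Int) := by omega
    rw [this, PySem.List.slice_natCast_add, PySem.Chars.isIn_iff_infix]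
    exact hinf

lemma pv_buckets_getD (l : List Int) (f : Int → List Char)
    (d0 : PySem.Dict (List Char) (List Int)) (key : List Char) :
    (l.foldl (fun d j => d.insert (f j) ((d.getD (f j) []) ++ [j])) d0).getD key []
      = d0.getD key [] ++ (l.filter (fun j => f j == key)) := by
  induction l generalizing d0 with
  | nil => simp
  | cons j rest ih =>
    simp only [List.foldl_cons, List.filter_cons]
    rw [ih]
    by_cases h : (f j == key) = true
    · have hkey : f j = key := eq_of_beq h
      subst hkey
      rw [PySem.Dict.getD_insert, if_pos rfl]
      simp
    · have hne : key ≠ f j := fun he => h (by simp [he])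
      rw [PySem.Dict.getD_insert, if_neg hne]
      simp [h]

lemma pv_getD_empty (key : List Char) :
    (PySem.Dict.empty : PySem.Dict (List Char) (List Int)).getD key [] = [] := by
  simp [PySem.Dict.getD, PySem.Dict.get?, PySem.Dict.empty]

lemma pv_B_true_iff (text content : String) (mn mx : Int)
    (h1 : PySem.Str.len text ≠ 0) (h2 : PySem.Str.len content ≠ 0)
    (h3 : mn ≤ (text.toList.length : Int)) (hmn : 1 ≤ mn) (hmx : mn ≤ mx) :
    any_fragment_in_content_py_alt text content mn mx = true ↔
      pvHasFrag text.toList content.toList mn.toNat := by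
  have hnlt : ¬ ((text.toList.length : Int) < mn) := by omega
  simp only [any_fragment_in_content_py_alt, PySem.Str.len_eq] at *
  rw [if_neg (by push Not; exact ⟨by omega, by omega, by omega, by omega⟩), if_neg (by omega)]
  set t := text.toList
  set c := content.toList
  set n := t.length
  set k : Nat := mn.toNat with hkdef
  have hmnk : mn = (k : Int) := by omega
  have hkpos : 0 < k := by omega
  set pN : Nat := min k 16 with hpdef
  have hpk : min ((k : Nat) : Int) 16 = (pN : Int) := by omega
  have hple : pN ≤ k := by omega
  simp only [hmnk, hpk, List.any_eq_true, PySem.List.mem_pyRange_one]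
  simp only [pv_buckets_getD _
      (fun j => PySem.List.slice c (some j) (some (j + (pN : Int)))) PySem.Dict.empty,
    pv_getD_empty, List.nil_append, List.mem_filter, PySem.List.mem_pyRange_one,
    beq_iff_eq]
  constructor
  · rintro ⟨i, ⟨hi0, hi1⟩, j, ⟨⟨hj0, hj1⟩, hjf⟩, heq⟩
    obtain ⟨iN, rfl⟩ : ∃ iN : Nat, (iN : Int) = i := ⟨i.toNat, Int.toNat_of_nonneg hi0⟩
    obtain ⟨jN, rfl⟩ : ∃ jN : Nat, (jN : Int) = j := ⟨j.toNat, Int.toNat_of_nonneg hj0⟩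
    rw [PySem.List.slice_natCast_add, PySem.List.slice_natCast_add] at heq
    refine ⟨iN, by omega, ?_⟩
    rw [pv_infix_iff c _ k ?_ hkpos]
    · exact ⟨jN, by omega, heq⟩
    · simp only [List.length_take, List.length_drop]
      omega
  · rintro ⟨i, hik, hinf⟩
    have hfl : (List.take k (List.drop i t)).length = k := by
      simp only [List.length_take, List.length_drop]; omega
    obtain ⟨j, hjk, hje⟩ := (pv_infix_iff c _ k hfl hkpos).mp hinf
    refine ⟨(i : Int), ⟨by omega, by omega⟩, (j : Int), ⟨⟨by omega, by omega⟩, ?_⟩, ?_⟩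
    · rw [PySem.List.slice_natCast_add, PySem.List.slice_natCast_add]
      have ht1 := List.take_take (i := pN) (j := k) (l := List.drop j c)
      have ht2 := List.take_take (i := pN) (j := k) (l := List.drop i t)
      rw [Nat.min_eq_left hple] at ht1 ht2
      rw [← ht1, ← ht2, hje]
    · rw [PySem.List.slice_natCast_add, PySem.List.slice_natCast_add]
      exact hje

lemma pv_slice_neg_zero (t : List Char) (mn : Int) :
    PySem.List.slice t (some (-mn)) (some 0) = [] := by
  have hlen := PySem.List.length_slice t (-mn) 0
  have h0 : PySem.List.clampIdx t.length 0 = 0 := by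
    simp
  rw [h0] at hlen
  exact List.eq_nil_of_length_eq_zero (by omega)

lemma pv_core (text content : String) (mn mx : Int) :
    any_fragment_in_content_py text content mn mx
      = any_fragment_in_content_py_alt text content mn mx := by
  by_cases hguard : PySem.Str.len text = 0 ∨ PySem.Str.len content = 0 ∨ (PySem.Str.len text) < mn
  · -- both guards fire (B's guard is a superset)
    rw [any_fragment_in_content_py, if_pos hguard,
      any_fragment_in_content_py_alt, if_pos (by tauto)]
  · push Not at hguard
    obtain ⟨h1, h2, h3⟩ := hguard
    have h1' : (1 : Int) ≤ (text.toList.length : Int) := by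
      rw [PySem.Str.len_eq] at h1; omega
    have h2' : (1 : Int) ≤ (content.toList.length : Int) := by
      rw [PySem.Str.len_eq] at h2; omega
    rw [PySem.Str.len_eq] at h3
    by_cases hmx : mx < mn
    · -- A's outer range is empty, B's guard fires
      rw [any_fragment_in_content_py_alt, if_pos (by rw [PySem.Str.len_eq]; tauto)]
      rw [any_fragment_in_content_py,
        if_neg (by rw [PySem.Str.len_eq]; push Not; exact ⟨by omega, by omega, by omega⟩)]
      rw [PySem.Str.len_eq]
      simp only [pvAnyRange_eq, List.any_eq_false]
      intro L hL
      rw [PySem.List.mem_pyRange_one] at hL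
      omega
    · push Not at hmx
      by_cases hmn : mn ≤ 0
      · -- B returns true; A finds an empty fragment at i = -mn
        rw [any_fragment_in_content_py_alt,
          if_neg (by rw [PySem.Str.len_eq]; push Not; exact ⟨by omega, by omega, by omega, by omega⟩),
          if_pos hmn]
        rw [any_fragment_in_content_py,
          if_neg (by rw [PySem.Str.len_eq]; push Not; exact ⟨by omega, by omega, by omega⟩)]
        rw [PySem.Str.len_eq]
        simp only [pvAnyRange_eq, List.any_eq_true, PySem.List.mem_pyRange_one]
        refine ⟨mn, ⟨le_refl _, by omega⟩, -mn, ⟨by omega, by omega⟩, ?_⟩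
        have hz : -mn + mn = 0 := by ring
        rw [hz, pv_slice_neg_zero text.toList mn]
        exact PySem.Chars.isIn_nil _
      · push Not at hmn
        have hA := pv_A_true_iff text content mn mx h1 h2 h3 (by omega) hmx
        have hB := pv_B_true_iff text content mn mx h1 h2 h3 (by omega) hmx
        rw [Bool.eq_iff_iff, hA, hB]

-- ===== VERDICT (by name: the statement is the Claim_ definition above) =====
theorem any_fragment_in_content_py_spec : Claim_equal_any_fragment_in_content_py := by
  intro text content mn mx _dom
  unfold Spec_any_fragment_in_content_py
  exact pv_core text content mn mx
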